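-- pv_equiv track=rewrite | github.com/ajyuan/Monitori | sentiment_analysis_models_exp/restaurant_features.py | get_ngram_features
-- ===== SOURCE A (Python) =====
-- def get_ngram_features(tokens):
--     """
--     This function creates the unigram and bigram features as described in
--     the assignment3 handout.
--
--     :param tokens:
--     :return: feature_vectors: a dictionary values for each ngram feature
--     """
--     feature_vectors = {}
--     words = []
--     for item in tokens:
--         if "_" not in item:
--             words.append("UNI_" + item)
--         else:
--             words.append("BIGRAM_" + item)
--     ###     YOUR CODE GOES HERE
--     for word in words:
--         #word = normalize(word)
--         #if word == None:
--         #    continue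
--         if word not in feature_vectors:
--             feature_vectors[word] = 1
--         elif feature_vectors[word] < 2:
--             feature_vectors[word] = 3
--
--     return feature_vectors
-- ===== SOURCE B (Python) =====
-- def get_ngram_features(tokens):
--     # Two-phase re-implementation: build prefixed words, count occurrences
--     # into a frequency table, then map each count to 1 (seen once) or 3.
--     words = [("BIGRAM_" if "_" in t else "UNI_") + t for t in tokens]
--     counts = {}
--     for w in words:
--         counts[w] = counts.get(w, 0) + 1
--     return {w: 1 if c == 1 else 3 for w, c in counts.items()}
-- ===== Notes on version B (the rewrite author's own statement) =====
-- stated objective: simpler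
-- what changed: Replaces the online three-way conditional update of the feature dict by a two-phase decomposition: count all prefixed words into a frequency table first, then build the result by mapping each count to 1 if it equals 1 else 3.
import Mathlib
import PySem

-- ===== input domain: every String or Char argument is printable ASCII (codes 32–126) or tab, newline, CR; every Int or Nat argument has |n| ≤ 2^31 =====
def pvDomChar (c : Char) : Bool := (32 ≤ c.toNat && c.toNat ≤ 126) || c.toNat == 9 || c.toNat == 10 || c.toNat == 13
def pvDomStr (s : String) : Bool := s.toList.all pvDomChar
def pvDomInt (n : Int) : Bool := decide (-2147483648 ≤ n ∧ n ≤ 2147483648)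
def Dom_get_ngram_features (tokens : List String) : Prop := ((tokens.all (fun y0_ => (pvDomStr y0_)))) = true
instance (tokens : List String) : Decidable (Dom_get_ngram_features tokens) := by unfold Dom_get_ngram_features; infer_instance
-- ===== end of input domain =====

-- B replaces A's online three-way dict update by a two-phase count-then-map decomposition (objective: simpler).

-- ===== PORT A =====
-- for item in tokens: append "UNI_"+item or "BIGRAM_"+item; then the online update loop.
def get_ngram_features (tokens : List String) : List (String × Int) :=
  let words := tokens.foldl (fun ws item =>
    if PySem.Str.isIn "_" item = false then ws ++ ["UNI_" ++ item]
    else ws ++ ["BIGRAM_" ++ item]) []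
  (words.foldl (fun d word =>
    if d.contains word = false then d.insert word 1
    else if d.getD word 0 < 2 then d.insert word 3
    else d) PySem.Dict.empty).items

-- ===== PORT B =====
-- words list comprehension; count into a frequency table; dict comprehension over the
-- counts' items (keys are distinct, so it is ported as a map over the items).
def get_ngram_features_alt (tokens : List String) : List (String × Int) :=
  let words := tokens.map (fun t => (if PySem.Str.isIn "_" t then "BIGRAM_" else "UNI_") ++ t)
  let counts := words.foldl (fun d w => d.insert w (d.getD w 0 + 1)) PySem.Dict.empty
  counts.items.map (fun wc => (wc.1, if wc.2 == (1 : Int) then (1 : Int) else 3))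

-- ===== PRECONDITION & SPEC =====
def Spec_get_ngram_features (tokens : List String) (out : List (String × Int)) : Prop := out = get_ngram_features_alt tokens
instance (tokens : List String) (out : List (String × Int)) : Decidable (Spec_get_ngram_features tokens out) := by unfold Spec_get_ngram_features; infer_instance

-- ===== CLAIM (what is proved, stated in full; the proofs are below) =====
def Claim_equal_get_ngram_features : Prop := ∀ (tokens : List String), Dom_get_ngram_features tokens → Spec_get_ngram_features tokens (get_ngram_features tokens)

-- ===== LEMMAS AND PROOFS =====

-- A's update loop, characterised: its items are the distinct words in first-occurrence
-- order, each paired with 1 if it occurs once and 3 otherwise.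
theorem get_ngram_features_loopA (l : List String) :
    (l.foldl (fun d word =>
      if d.contains word = false then d.insert word 1
      else if d.getD word 0 < 2 then d.insert word 3
      else d) (PySem.Dict.empty : PySem.Dict String Int)).items
    = (PySem.Set.ofList l).map (fun k => (k, if l.count k = 1 then (1 : Int) else 3)) := by
  induction l using List.reverseRecOn with
  | nil => rfl
  | append_singleton l w ih =>
    rw [List.foldl_append, List.foldl_cons, List.foldl_nil]
    generalize hd : (l.foldl (fun d word =>
      if d.contains word = false then d.insert word 1
      else if d.getD word 0 < 2 then d.insert word 3
      else d) (PySem.Dict.empty : PySem.Dict String Int)) = d at ih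
    have hkeys : d.keys = PySem.Set.ofList l := by
      rw [PySem.Dict.keys, ih, List.map_map]
      exact (List.map_congr_left (fun a _ => rfl)).trans (List.map_id _)
    have hnodup : d.keys.Nodup := by rw [hkeys]; exact PySem.Set.nodup_ofList l
    have hsetadd : PySem.Set.ofList (l ++ [w]) = (PySem.Set.ofList l).add w := by
      simp [PySem.Set.ofList]
    by_cases hw : w ∈ l
    · have hcont : d.contains w = true := by
        rw [PySem.Dict.contains_iff_mem_keys, hkeys, PySem.Set.mem_ofList]; exact hw
      have hset : PySem.Set.ofList (l ++ [w]) = PySem.Set.ofList l := by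
        rw [hsetadd, PySem.Set.add]
        simp [PySem.Set.contains, PySem.Set.mem_ofList, hw]
      have hmem : (w, if l.count w = 1 then (1 : Int) else 3) ∈ d.items := by
        rw [ih]; exact List.mem_map.mpr ⟨w, (PySem.Set.mem_ofList l w).mpr hw, rfl⟩
      have hgetD : d.getD w 0 = if l.count w = 1 then (1 : Int) else 3 :=
        PySem.Dict.getD_of_mem_items d hmem hnodup 0
      have hpos : 0 < l.count w := List.count_pos_iff.mpr hw
      rw [hcont]
      by_cases hc : l.count w = 1
      · have hlt : d.getD w 0 < 2 := by rw [hgetD, if_pos hc]; norm_num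
        simp only [Bool.true_eq_false, if_false, if_pos hlt]
        rw [PySem.Dict.items_insert_of_contains d 3 hcont, ih, List.map_map, hset]
        refine List.map_congr_left (fun k hk => ?_)
        by_cases hkw : k = w
        · subst hkw
          simp [hc, List.count_append]
        · have hwk : ¬ w = k := fun h => hkw h.symm
          simp [Function.comp, hkw, hwk, List.count_append]
      · have h3 : d.getD w 0 = 3 := by rw [hgetD, if_neg hc]
        have hlt : ¬ d.getD w 0 < 2 := by rw [h3]; norm_num
        simp only [Bool.true_eq_false, if_false, if_neg hlt]
        rw [ih, hset]
        refine List.map_congr_left (fun k hk => ?_)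
        by_cases hkw : k = w
        · subst hkw
          simp only [hc, if_false, List.count_append]
          rw [if_neg (by simp; omega)]
        · have hwk : ¬ w = k := fun h => hkw h.symm
          simp [hwk, List.count_append]
    · have hcont : d.contains w = false := by
        rw [← Bool.not_eq_true, PySem.Dict.contains_iff_mem_keys, hkeys, PySem.Set.mem_ofList]
        exact hw
      have hset : PySem.Set.ofList (l ++ [w]) = PySem.Set.ofList l ++ [w] := by
        rw [hsetadd, PySem.Set.add]
        simp [PySem.Set.contains, PySem.Set.mem_ofList, hw]
      rw [hcont, if_pos rfl, PySem.Dict.items_insert_of_not_contains d 1 hcont, ih, hset,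
        List.map_append]
      congr 1
      · refine List.map_congr_left (fun k hk => ?_)
        have hkl : k ∈ l := (PySem.Set.mem_ofList l k).mp hk
        have hwk : ¬ w = k := by rintro rfl; exact hw hkl
        simp [List.count_append, hwk]
      · simp [List.count_append, List.count_eq_zero_of_not_mem hw]

-- A's word-building loop equals B's map.
theorem get_ngram_features_words (tokens : List String) :
    tokens.foldl (fun ws item =>
      if PySem.Str.isIn "_" item = false then ws ++ ["UNI_" ++ item]
      else ws ++ ["BIGRAM_" ++ item]) []
    = tokens.map (fun t => (if PySem.Str.isIn "_" t then "BIGRAM_" else "UNI_") ++ t) := by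
  have h : ∀ (ws : List String) (item : String),
      (if PySem.Str.isIn "_" item = false then ws ++ ["UNI_" ++ item]
       else ws ++ ["BIGRAM_" ++ item])
      = ws ++ [(if PySem.Str.isIn "_" item then "BIGRAM_" else "UNI_") ++ item] := by
    intro ws item
    cases hb : PySem.Str.isIn "_" item <;> simp
  simp only [h]
  exact PySem.List.foldl_append_singleton_eq_map _ tokens []

-- ===== VERDICT (by name: the statement is the Claim_ definition above) =====
theorem get_ngram_features_spec : Claim_equal_get_ngram_features := by
  intro tokens _
  show get_ngram_features tokens = get_ngram_features_alt tokens
  have hA : get_ngram_features tokens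
      = ((tokens.foldl (fun ws item =>
          if PySem.Str.isIn "_" item = false then ws ++ ["UNI_" ++ item]
          else ws ++ ["BIGRAM_" ++ item]) []).foldl (fun d word =>
        if d.contains word = false then d.insert word 1
        else if d.getD word 0 < 2 then d.insert word 3
        else d) (PySem.Dict.empty : PySem.Dict String Int)).items := rfl
  have hB : get_ngram_features_alt tokens
      = (PySem.Dict.counter
          (tokens.map (fun t => (if PySem.Str.isIn "_" t then "BIGRAM_" else "UNI_") ++ t))).items.map
          (fun wc => (wc.1, if wc.2 == (1 : Int) then (1 : Int) else 3)) := by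
    show (((tokens.map (fun t => (if PySem.Str.isIn "_" t then "BIGRAM_" else "UNI_") ++ t)).foldl
        (fun d w => d.insert w (d.getD w 0 + 1)) PySem.Dict.empty).items.map
        (fun wc => (wc.1, if wc.2 == (1 : Int) then (1 : Int) else 3))) = _
    rw [PySem.Dict.foldl_insert_getD_add_one_eq_counter]
  rw [hA, hB, get_ngram_features_words, get_ngram_features_loopA,
    PySem.Dict.items_counter, List.map_map]
  refine List.map_congr_left (fun k hk => ?_)
  simp [Function.comp]
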